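-- pv_equiv track=rewrite | github.com/Fame2875/Python-2-1 | Lab_9/63010224_Lab9_3.py | isPlaindrome
-- ===== SOURCE A (Python) =====
-- def islowtohigh(arr):
--     n = len(arr)
--     for i in range(n - 1):
--         if arr[i] > arr[i + 1]:
--             return False
--     return True
--
-- def isPlaindrome(arr):
--     q = []
--     if not islowtohigh(arr):
--         return False
--
--     for i in arr:
--         if i in q:
--             return True
--         else:
--             q.append(i)
--     return False
-- ===== SOURCE B (Python) =====
-- def isPlaindrome(arr):
--     s = sorted(arr)
--     return arr == s and any(s[i] == s[i + 1] for i in range(len(s) - 1))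
-- ===== Notes on version B (the rewrite author's own statement) =====
-- stated objective: simpler
-- what changed: Replaces the neighbor-scan sortedness check plus the quadratic seen-list duplicate scan by sort-and-compare (arr == sorted(arr)) and one adjacent-equality pass over the sorted copy.
import Mathlib
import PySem

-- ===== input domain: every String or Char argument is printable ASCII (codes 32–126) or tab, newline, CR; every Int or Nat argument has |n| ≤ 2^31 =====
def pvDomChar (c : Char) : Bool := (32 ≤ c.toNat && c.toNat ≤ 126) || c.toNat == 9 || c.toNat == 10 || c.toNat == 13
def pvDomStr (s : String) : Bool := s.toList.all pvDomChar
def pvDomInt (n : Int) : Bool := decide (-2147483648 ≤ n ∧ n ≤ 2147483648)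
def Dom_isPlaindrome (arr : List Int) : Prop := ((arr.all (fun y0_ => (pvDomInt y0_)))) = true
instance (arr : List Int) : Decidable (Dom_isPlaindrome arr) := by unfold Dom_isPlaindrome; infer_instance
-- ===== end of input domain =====

-- B replaces A's neighbor-scan sortedness check and quadratic seen-list duplicate scan by
-- sort-and-compare plus one adjacent-equality pass over the sorted copy (objective: simpler).

-- ===== PORT A =====
-- `for i in range(n-1): if arr[i] > arr[i+1]: return False` — the same comparisons
-- arr[i] vs arr[i+1], in order, with early exit, as structural recursion on the list.
def islowtohigh : List Int → Bool
  | a :: b :: rest => if a > b then false else islowtohigh (b :: rest)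
  | _ => true

-- `for i in arr: if i in q: return True; else: q.append(i)` with accumulator q.
def isPlaindromeLoop : List Int → List Int → Bool
  | [], _ => false
  | i :: rest, q => if q.contains i then true else isPlaindromeLoop rest (q ++ [i])

def isPlaindrome (arr : List Int) : Bool :=
  if !(islowtohigh arr) then false else isPlaindromeLoop arr []

-- ===== PORT B =====
-- `any(s[i] == s[i+1] for i in range(len(s)-1))` — the same adjacent comparisons,
-- in order, with early exit, as structural recursion on the sorted list.
def adjEq : List Int → Bool
  | a :: b :: rest => if a == b then true else adjEq (b :: rest)
  | _ => false

def isPlaindrome_alt (arr : List Int) : Bool :=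
  let s := PySem.List.sorted arr (fun x => x) false
  decide (arr = s) && adjEq s

-- ===== PRECONDITION & SPEC =====
def Spec_isPlaindrome (arr : List Int) (out : Bool) : Prop := out = isPlaindrome_alt arr
instance (arr : List Int) (out : Bool) : Decidable (Spec_isPlaindrome arr out) := by unfold Spec_isPlaindrome; infer_instance

-- ===== CLAIM (what is proved, stated in full; the proofs are below) =====
def Claim_equal_isPlaindrome : Prop := ∀ (arr : List Int), Dom_isPlaindrome arr → Spec_isPlaindrome arr (isPlaindrome arr)

-- ===== LEMMAS AND PROOFS =====

theorem islowtohigh_iff_pairwise : ∀ l : List Int, islowtohigh l = true ↔ l.Pairwise (· ≤ ·)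
  | [] => by simp [islowtohigh]
  | [a] => by simp [islowtohigh]
  | a :: b :: rest => by
    have ih := islowtohigh_iff_pairwise (b :: rest)
    by_cases hab : a > b
    · simp only [islowtohigh, if_pos hab]
      constructor
      · intro h; cases h
      · intro hp
        exact absurd ((List.pairwise_cons.mp hp).1 b (by simp)) (not_le.mpr hab)
    · simp only [islowtohigh, if_neg hab]
      rw [ih]
      push Not at hab
      constructor
      · intro hp
        refine List.pairwise_cons.mpr ⟨?_, hp⟩
        intro x hx
        rcases List.mem_cons.mp hx with rfl | hx
        · exact hab
        · exact le_trans hab ((List.pairwise_cons.mp hp).1 x hx)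
      · exact List.Pairwise.of_cons

theorem isPlaindromeLoop_iff : ∀ (xs q : List Int), q.Nodup →
    (isPlaindromeLoop xs q = true ↔ ¬ (q ++ xs).Nodup)
  | [], q, hq => by simp [isPlaindromeLoop, hq]
  | i :: rest, q, hq => by
    by_cases hmem : i ∈ q
    · simp only [isPlaindromeLoop, List.contains_eq_mem, hmem, decide_true, if_true, true_iff]
      intro hnd
      exact (List.disjoint_of_nodup_append hnd) hmem (by simp)
    · have hq' : (q ++ [i]).Nodup := by
        simp only [List.nodup_append, hq, List.nodup_singleton, true_and]
        intro a ha b hb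
        rw [List.mem_singleton] at hb
        subst hb
        exact fun h => hmem (h ▸ ha)
      have ih := isPlaindromeLoop_iff rest (q ++ [i]) hq'
      simp only [isPlaindromeLoop, List.contains_eq_mem, hmem, decide_false,
        Bool.false_eq_true, if_false]
      rw [ih]
      simp [List.append_assoc]

theorem adjEq_iff_not_nodup : ∀ s : List Int, s.Pairwise (· ≤ ·) →
    (adjEq s = true ↔ ¬ s.Nodup)
  | [] => by simp [adjEq]
  | [a] => by simp [adjEq]
  | a :: b :: rest => by
    intro hp
    have hp' := hp.of_cons
    have ih := adjEq_iff_not_nodup (b :: rest) hp'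
    by_cases hab : a = b
    · subst hab
      simp [adjEq]
    · have hb : ∀ x ∈ b :: rest, b ≤ x := by
        intro x hx
        rcases List.mem_cons.mp hx with rfl | hx
        · exact le_refl x
        · exact (List.pairwise_cons.mp hp').1 x hx
      have halt : a < b := lt_of_le_of_ne ((List.pairwise_cons.mp hp).1 b (by simp)) hab
      have hnotmem : a ∉ b :: rest := by
        intro hmem
        exact absurd (lt_of_lt_of_le halt (hb a hmem)) (lt_irrefl a)
      simp only [adjEq, beq_iff_eq, hab, if_false]
      rw [ih]
      simp [List.nodup_cons, hnotmem]

theorem sorted_self_iff (arr : List Int) :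
    PySem.List.sorted arr (fun x => x) false = arr ↔ arr.Pairwise (· ≤ ·) := by
  constructor
  · intro h
    have := PySem.List.sorted_pairwise arr (fun x => x)
    rw [h] at this
    exact this
  · intro h
    exact PySem.List.sorted_eq_self_of_pairwise arr (fun x => x) h

-- ===== VERDICT (by name: the statement is the Claim_ definition above) =====
theorem isPlaindrome_spec : Claim_equal_isPlaindrome := by
  intro arr _
  unfold Spec_isPlaindrome isPlaindrome isPlaindrome_alt
  by_cases hlow : islowtohigh arr = true
  · have hp : arr.Pairwise (· ≤ ·) := (islowtohigh_iff_pairwise arr).mp hlow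
    have hs : PySem.List.sorted arr (fun x => x) false = arr :=
      (sorted_self_iff arr).mpr hp
    simp only [hlow, Bool.not_true, Bool.false_eq_true, if_false, hs]
    have h1 := isPlaindromeLoop_iff arr [] (by simp)
    have h2 := adjEq_iff_not_nodup arr hp
    simp only [List.nil_append] at h1
    cases hA : isPlaindromeLoop arr [] <;> cases hB : adjEq arr <;> simp_all
  · have hs : PySem.List.sorted arr (fun x => x) false ≠ arr := by
      intro h
      exact hlow ((islowtohigh_iff_pairwise arr).mpr ((sorted_self_iff arr).mp h))
    simp only [hlow]
    simp [Ne.symm hs]
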